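-- pv_equiv track=rewrite | github.com/HCH725/HONGSTR | scripts/self_heal/build_patch_from_anchor.py | find_section_insert_at
-- ===== SOURCE A (Python) =====
-- SECTION_HEADER = "## Deployment notes (macOS launchd)"
--
-- def find_section_insert_at(lines: list[str]) -> int:
--     try:
--         header_index = lines.index(SECTION_HEADER)
--     except ValueError:
--         for index, line in enumerate(lines):
--             if "Deployment notes" in line:
--                 header_index = index
--                 break
--         else:
--             return -1
--
--     next_section = len(lines)
--     for index in range(header_index + 1, len(lines)):
--         if lines[index].startswith("## "):
--             next_section = index
--             break
--
--     insert_at = next_section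
--     while insert_at > header_index + 1 and lines[insert_at - 1] == "":
--         insert_at -= 1
--     return insert_at
-- ===== SOURCE B (Python) =====
-- SECTION_HEADER = "## Deployment notes (macOS launchd)"
--
-- def find_section_insert_at(lines: list[str]) -> int:
--     if SECTION_HEADER in lines:
--         header_index = lines.index(SECTION_HEADER)
--     else:
--         header_index = next(
--             (i for i, line in enumerate(lines) if "Deployment notes" in line), None
--         )
--         if header_index is None:
--             return -1
--     last_content = None
--     for i in range(header_index + 1, len(lines)):
--         line = lines[i]
--         if line.startswith("## "):
--             break
--         if line != "":
--             last_content = i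
--     return last_content + 1 if last_content is not None else header_index + 1
-- ===== Notes on version B (the rewrite author's own statement) =====
-- stated objective: simpler
-- what changed: The separate forward next-section scan and backward blank-trimming loop are replaced by a single forward pass that stops at the next '## ' header and tracks the index of the last non-empty line, returning last_content+1 (or header_index+1 if the section has no content).
import Mathlib
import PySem

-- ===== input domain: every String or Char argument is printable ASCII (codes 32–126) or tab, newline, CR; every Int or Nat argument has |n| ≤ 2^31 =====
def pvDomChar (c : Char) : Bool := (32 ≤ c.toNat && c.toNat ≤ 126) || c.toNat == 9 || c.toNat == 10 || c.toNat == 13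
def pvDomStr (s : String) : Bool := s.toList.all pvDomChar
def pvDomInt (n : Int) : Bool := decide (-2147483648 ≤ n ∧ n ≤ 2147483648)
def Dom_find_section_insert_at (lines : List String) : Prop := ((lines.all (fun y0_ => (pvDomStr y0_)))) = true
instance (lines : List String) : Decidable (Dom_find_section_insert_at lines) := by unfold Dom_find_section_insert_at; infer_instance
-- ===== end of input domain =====

-- B replaces A's forward next-section scan plus backward blank-trim loop by one forward pass tracking the last non-empty line (simpler decomposition, same O(n) cost).


def SECTION_HEADER : String := "## Deployment notes (macOS launchd)"

-- header-location fallback: the enumerate loop 'if "Deployment notes" in line'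
-- (this loop is textually identical in both Pythons, so both ports use it)
def pvFindSub : List String → Nat → Option Nat
  | [], _ => none
  | l :: ls, i => if PySem.Str.isIn "Deployment notes" l then some i else pvFindSub ls (i + 1)

-- ===== PORT A =====
-- A's forward loop 'for index in range(header_index+1, len(lines)): if startswith "## ": next_section = index; break'
def pvFirstSection (len : Nat) : List String → Nat → Nat
  | [], _ => len
  | l :: ls, i => if PySem.Str.startswith l "## " then i else pvFirstSection len ls (i + 1)

-- A's backward loop 'while insert_at > header_index + 1 and lines[insert_at - 1] == "": insert_at -= 1'
def pvTrim (lines : List String) (h : Nat) : Nat → Nat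
  | 0 => 0
  | ia + 1 => if h + 1 < ia + 1 ∧ lines.getD ia "" = "" then pvTrim lines h ia else ia + 1

def find_section_insert_at (lines : List String) : Int :=
  match
    (match PySem.List.index? lines SECTION_HEADER with
     | some k => some k
     | none => pvFindSub lines 0) with
  | none => -1
  | some h =>
      let ns := pvFirstSection lines.length (lines.drop (h + 1)) (h + 1)
      (pvTrim lines h ns : Int)

-- ===== PORT B =====
-- B's single forward pass: break on '## ', remember the last non-empty index
def pvScanB : List String → Nat → Option Nat → Option Nat
  | [], _, last => last
  | l :: ls, i, last =>
      if PySem.Str.startswith l "## " then last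
      else pvScanB ls (i + 1) (if l = "" then last else some i)

def find_section_insert_at_alt (lines : List String) : Int :=
  match
    (if SECTION_HEADER ∈ lines then PySem.List.index? lines SECTION_HEADER
     else pvFindSub lines 0) with
  | none => -1
  | some h =>
      match pvScanB (lines.drop (h + 1)) (h + 1) none with
      | some j => ((j : Nat) : Int) + 1
      | none => ((h : Nat) : Int) + 1

-- ===== PRECONDITION & SPEC =====
def Spec_find_section_insert_at (lines : List String) (out : Int) : Prop := out = find_section_insert_at_alt lines
instance (lines : List String) (out : Int) : Decidable (Spec_find_section_insert_at lines out) := by unfold Spec_find_section_insert_at; infer_instance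

-- ===== CLAIM (what is proved, stated in full; the proofs are below) =====
def Claim_equal_find_section_insert_at : Prop := ∀ (lines : List String), Dom_find_section_insert_at lines → Spec_find_section_insert_at lines (find_section_insert_at lines)

-- ===== LEMMAS AND PROOFS =====

lemma pvTrim_base (lines : List String) (h : Nat) : pvTrim lines h (h + 1) = h + 1 := by
  simp [pvTrim]

lemma pvFindSub_lt_length : ∀ (ls : List String) (i h : Nat),
    pvFindSub ls i = some h → h < i + ls.length := by
  intro ls
  induction ls with
  | nil => intro i h hh; simp [pvFindSub] at hh
  | cons l ls ih =>
    intro i h hh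
    simp only [pvFindSub] at hh
    split at hh
    · simp at hh; simp; omega
    · have := ih (i + 1) h hh; simp; omega

lemma key (suffix : List String) : ∀ (lines : List String) (h i : Nat) (last : Option Nat),
    suffix = lines.drop i → h + 1 ≤ i → i ≤ lines.length →
    pvTrim lines h i = (match last with | some j => j + 1 | none => h + 1) →
    pvTrim lines h (pvFirstSection lines.length suffix i) =
      (match pvScanB suffix i last with | some j => j + 1 | none => h + 1) := by
  induction suffix with
  | nil =>
    intro lines h i last hsuf hhi hilen htrim
    have hlen : lines.length ≤ i := by
      have := congrArg List.length hsuf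
      simp at this; omega
    have hieq : i = lines.length := by omega
    simpa [pvFirstSection, pvScanB, hieq] using htrim
  | cons l ls ih =>
    intro lines h i last hsuf hhi hilen htrim
    have hi : i < lines.length := by
      by_contra hc
      have hnil : lines.drop i = [] := List.drop_eq_nil_of_le (by omega)
      rw [hnil] at hsuf; simp at hsuf
    have hdrop : lines.drop i = lines[i] :: lines.drop (i + 1) :=
      List.drop_eq_getElem_cons hi
    rw [hdrop] at hsuf
    injection hsuf with hl hls
    have hgd : lines.getD i "" = l := by
      rw [List.getD_eq_getElem _ _ hi]; exact hl.symm
    have hlt : h + 1 < i + 1 := by omega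
    cases hsw : PySem.Str.startswith l "## " with
    | true =>
      simp only [pvFirstSection, pvScanB, hsw, if_true]
      exact htrim
    | false =>
      simp only [pvFirstSection, pvScanB, hsw, Bool.false_eq_true, if_false]
      have hstep : pvTrim lines h (i + 1) = if l = "" then pvTrim lines h i else i + 1 := by
        simp only [pvTrim, hgd]
        by_cases he : l = "" <;> simp [he, hlt]
      refine ih lines h (i + 1) _ hls (by omega) (by omega) ?_
      by_cases he : l = ""
      · rw [hstep, if_pos he, if_pos he]; exact htrim
      · rw [hstep, if_neg he, if_neg he]

lemma main_eq (lines : List String) (h : Nat) (hlt : h < lines.length) :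
    (pvTrim lines h (pvFirstSection lines.length (lines.drop (h + 1)) (h + 1)) : Int) =
      (match pvScanB (lines.drop (h + 1)) (h + 1) none with
       | some j => ((j : Nat) : Int) + 1
       | none => ((h : Nat) : Int) + 1) := by
  have hk := key (lines.drop (h + 1)) lines h (h + 1) none rfl (by omega) (by omega)
    (by simpa using pvTrim_base lines h)
  rw [hk]
  cases pvScanB (lines.drop (h + 1)) (h + 1) none <;> simp

-- ===== VERDICT (by name: the statement is the Claim_ definition above) =====
theorem find_section_insert_at_spec : Claim_equal_find_section_insert_at := by
  intro lines _
  unfold Spec_find_section_insert_at find_section_insert_at find_section_insert_at_alt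
  cases hidx : PySem.List.index? lines SECTION_HEADER with
  | some k =>
    obtain ⟨hk, he, -⟩ := PySem.List.getElem_of_index?_eq_some hidx
    have hmem : SECTION_HEADER ∈ lines := he ▸ List.getElem_mem hk
    rw [if_pos hmem]
    exact main_eq lines k hk
  | none =>
    have hmem : SECTION_HEADER ∉ lines := (PySem.List.index?_eq_none_iff _ _).mp hidx
    rw [if_neg hmem]
    cases hsub : pvFindSub lines 0 with
    | none => rfl
    | some h =>
      have hh : h < lines.length := by
        have := pvFindSub_lt_length lines 0 h hsub
        omega
      exact main_eq lines h hh
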